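-- pv_equiv track=rewrite | github.com/rosariopiognazzo/Cascade-Sort | CascadeSort.py | vanilla_partitioning
-- ===== SOURCE A (Python) =====
-- def extract_order_sublist(seq):
--     '''Function to extract from a sequence of random numbers an ordered sub-sequence.
--     Return the ordered sub-sequence extract and the sub-sequence not ordered.'''
--     ordered = [seq[0]]
--     not_ordered = []
--
--     for i in range(1, len(seq)):
--         if seq[i] >= ordered[-1]:
--             ordered.append(seq[i])
--         else:
--             not_ordered.append(seq[i])
--
--     return ordered, not_ordered
--
-- def vanilla_partitioning(seq):
--     '''Function to partition an input sequence into its sorted subsequences.'''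
--     D = list()
--
--     while True:
--         o, no = extract_order_sublist(seq)
--         D.append(o)
--         if not no:
--             break
--         seq = no
--
--     return D
-- ===== SOURCE B (Python) =====
-- def vanilla_partitioning(seq):
--     '''One online pass: each element is appended to the first pile whose top is
--     <= it (pile tops stay strictly decreasing, so that pile is found by binary
--     search); the piles in creation order are exactly A's extracted runs.'''
--     piles = []
--     tops = []
--     for x in seq:
--         lo, hi = 0, len(piles)
--         while lo < hi:
--             mid = (lo + hi) // 2
--             if tops[mid] <= x:
--                 hi = mid
--             else:
--                 lo = mid + 1
--         if lo == len(piles):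
--             piles.append([x])
--             tops.append(x)
--         else:
--             piles[lo].append(x)
--             tops[lo] = x
--     return piles
-- ===== Notes on version B (the rewrite author's own statement) =====
-- stated objective: faster
-- what changed: Instead of repeatedly re-scanning the remainder to peel off one non-decreasing run per pass, B makes a single online pass that drops each element on the first pile whose top is <= it, located by binary search over the strictly decreasing pile tops.
import Mathlib
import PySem

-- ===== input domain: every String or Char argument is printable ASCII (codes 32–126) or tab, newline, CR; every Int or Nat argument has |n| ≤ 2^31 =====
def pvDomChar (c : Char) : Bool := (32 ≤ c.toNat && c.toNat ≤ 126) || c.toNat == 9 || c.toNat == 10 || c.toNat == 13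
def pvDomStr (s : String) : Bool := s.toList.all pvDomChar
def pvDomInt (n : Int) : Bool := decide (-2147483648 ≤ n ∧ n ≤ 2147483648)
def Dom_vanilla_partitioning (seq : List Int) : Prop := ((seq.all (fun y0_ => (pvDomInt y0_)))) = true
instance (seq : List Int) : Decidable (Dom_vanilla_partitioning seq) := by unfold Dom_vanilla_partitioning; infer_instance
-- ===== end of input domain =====

-- B replaces A's repeated extraction passes by one online pass placing each
-- element on the first pile whose top is ≤ it, found by binary search (faster).

-- ===== PORT A =====
-- one loop step of extract_order_sublist: looks up seq[i] and ordered[-1]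
-- (both always in range on inputs admitted by Pre_, so pyGetD's default is never used)
def extStep (seq : List Int) (st : List Int × List Int) (i : Int) : List Int × List Int :=
  if PySem.List.pyGetD seq i 0 ≥ PySem.List.pyGetD st.1 (-1) 0 then
    (st.1 ++ [PySem.List.pyGetD seq i 0], st.2)
  else
    (st.1, st.2 ++ [PySem.List.pyGetD seq i 0])

-- seq[0] raises IndexError on seq = []; that input is excluded by Pre_
def extract_order_sublist (seq : List Int) : List Int × List Int :=
  (PySem.List.pyRange 1 (seq.length : Int) 1).foldl (extStep seq)
    ([PySem.List.pyGetD seq 0 0], [])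

theorem extStep_len (seq : List Int) (st : List Int × List Int) (i : Int) :
    (extStep seq st i).1.length + (extStep seq st i).2.length
      = st.1.length + st.2.length + 1 := by
  unfold extStep; split <;> simp <;> omega

theorem foldl_extStep_len (seq : List Int) (l : List Int) (st : List Int × List Int) :
    ((l.foldl (extStep seq) st).1.length + (l.foldl (extStep seq) st).2.length)
      = st.1.length + st.2.length + l.length := by
  induction l generalizing st with
  | nil => simp
  | cons x xs ih =>
      simp only [List.foldl_cons, ih, extStep_len, List.length_cons]; omega

theorem foldl_extStep_fst_ge (seq : List Int) (l : List Int) (st : List Int × List Int) :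
    st.1.length ≤ (l.foldl (extStep seq) st).1.length := by
  induction l generalizing st with
  | nil => simp
  | cons x xs ih =>
      refine le_trans ?_ (ih (extStep seq st x))
      unfold extStep; split <;> simp

-- used by the port's termination proof
theorem extract_snd_lt (seq : List Int) (h : (extract_order_sublist seq).2 ≠ []) :
    (extract_order_sublist seq).2.length < seq.length := by
  rcases seq with _ | ⟨a, rest⟩
  · exact absurd (rfl : (extract_order_sublist ([] : List Int)).2 = []) h
  · have hlen := foldl_extStep_len (a :: rest)
      (PySem.List.pyRange 1 (((a :: rest).length : Int)) 1)
      ([PySem.List.pyGetD (a :: rest) 0 0], [])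
    have hfst := foldl_extStep_fst_ge (a :: rest)
      (PySem.List.pyRange 1 (((a :: rest).length : Int)) 1)
      ([PySem.List.pyGetD (a :: rest) 0 0], [])
    have hrange : (PySem.List.pyRange 1 (((a :: rest).length : Int)) 1).length
        = rest.length := by
      rw [PySem.List.length_pyRange_one]
      simp only [List.length_cons]
      omega
    rw [hrange] at hlen
    unfold extract_order_sublist
    simp only [List.length_cons, List.length_nil] at hlen hfst ⊢
    omega

def vanilla_partitioning (seq : List Int) : List (List Int) :=
  let p := extract_order_sublist seq
  if p.2 = [] then [p.1]
  else p.1 :: vanilla_partitioning p.2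
termination_by seq.length
decreasing_by exact extract_snd_lt seq (by assumption)

-- ===== PORT B =====
-- the while lo < hi binary-search loop; tops[mid] is always in range (mid < hi ≤ len tops)
def bisectLoop (tops : List Int) (x : Int) (lo hi : Nat) : Nat :=
  if _h : lo < hi then
    if tops.getD ((lo + hi) / 2) 0 ≤ x then bisectLoop tops x lo ((lo + hi) / 2)
    else bisectLoop tops x ((lo + hi) / 2 + 1) hi
  else lo
termination_by hi - lo
decreasing_by all_goals omega

-- one iteration of B's for loop over the state (piles, tops)
def vpStep (st : List (List Int) × List Int) (x : Int) : List (List Int) × List Int :=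
  let lo := bisectLoop st.2 x 0 st.1.length
  if lo = st.1.length then (st.1 ++ [[x]], st.2 ++ [x])
  else (st.1.set lo (st.1.getD lo [] ++ [x]), st.2.set lo x)

def vanilla_partitioning_alt (seq : List Int) : List (List Int) :=
  (seq.foldl vpStep ([], [])).1

-- ===== PRECONDITION & SPEC =====
-- Pre_ excludes only the empty list, on which A raises IndexError (seq[0])
def Pre_vanilla_partitioning (seq : List Int) : Prop := seq ≠ []
instance (seq : List Int) : Decidable (Pre_vanilla_partitioning seq) := by
  unfold Pre_vanilla_partitioning; infer_instance

def pvWitness_vanilla_partitioning : List Int := [3, 1, 2]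

def Spec_vanilla_partitioning (seq : List Int) (out : List (List Int)) : Prop :=
  out = vanilla_partitioning_alt seq
instance (seq : List Int) (out : List (List Int)) :
    Decidable (Spec_vanilla_partitioning seq out) := by
  unfold Spec_vanilla_partitioning; infer_instance

-- ===== CLAIM (what is proved, stated in full; the proofs are below) =====
def Claim_equal_vanilla_partitioning : Prop :=
  ∀ (seq : List Int), Dom_vanilla_partitioning seq → Pre_vanilla_partitioning seq →
    Spec_vanilla_partitioning seq (vanilla_partitioning seq)

-- ===== LEMMAS AND PROOFS =====

-- top of a pile (piles are always nonempty, so the default is never used)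
def pvTop (p : List Int) : Int := p.getLastD 0

-- greedy split of xs relative to a current top t (the mathematical core of A's pass)
def pvExt (t : Int) : List Int → List Int × List Int
  | [] => ([], [])
  | x :: xs =>
      if t ≤ x then (x :: (pvExt x xs).1, (pvExt x xs).2)
      else ((pvExt t xs).1, x :: (pvExt t xs).2)

-- structural "first fit" placement (the mathematical core of B's step)
def pvFF : List (List Int) → Int → List (List Int)
  | [], x => [[x]]
  | p :: ps, x => if pvTop p ≤ x then (p ++ [x]) :: ps else p :: pvFF ps x

theorem pvTop_append (p : List Int) (x : Int) : pvTop (p ++ [x]) = x := by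
  simp [pvTop]

theorem getLast_eq_getLastD (y : Int) (ys : List Int) (h : y :: ys ≠ []) :
    (y :: ys).getLast h = (y :: ys).getLastD 0 := by
  rw [List.getLast_eq_iff_getLast?_eq_some, List.getLastD_eq_getLast?]
  cases hq : (y :: ys).getLast? with
  | none => simp at hq
  | some v => rfl

theorem pyGetD_neg_one_top (o : List Int) (ho : o ≠ []) :
    PySem.List.pyGetD o (-1) 0 = pvTop o := by
  rcases o with _ | ⟨y, ys⟩
  · exact absurd rfl ho
  · rw [PySem.List.pyGetD_neg_one _ 0 ho, pvTop]
    exact getLast_eq_getLastD y ys ho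

-- ---- A side: extract_order_sublist computes pvExt ----

theorem foldl_f_eq_pvExt (xs : List Int) (o nd : List Int) (ho : o ≠ []) :
    xs.foldl (fun st x =>
        if x ≥ PySem.List.pyGetD st.1 (-1) 0 then (st.1 ++ [x], st.2)
        else (st.1, st.2 ++ [x])) (o, nd)
      = (o ++ (pvExt (pvTop o) xs).1, nd ++ (pvExt (pvTop o) xs).2) := by
  induction xs generalizing o nd with
  | nil => simp [pvExt]
  | cons x xs ih =>
      simp only [List.foldl_cons, pyGetD_neg_one_top o ho, ge_iff_le, pvExt]
      by_cases hc : pvTop o ≤ x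
      · simp only [if_pos hc]
        rw [ih (o ++ [x]) nd (by simp), pvTop_append]
        simp
      · simp only [if_neg hc]
        rw [ih o (nd ++ [x]) ho]
        simp

theorem extract_eq_pvExt (a : Int) (rest : List Int) :
    extract_order_sublist (a :: rest)
      = (a :: (pvExt a rest).1, (pvExt a rest).2) := by
  unfold extract_order_sublist
  have hstep : extStep (a :: rest) = (fun (st : List Int × List Int) (i : Int) =>
      (fun (st : List Int × List Int) (x : Int) =>
        if x ≥ PySem.List.pyGetD st.1 (-1) 0 then (st.1 ++ [x], st.2)
        else (st.1, st.2 ++ [x])) st (PySem.List.pyGetD (a :: rest) i 0)) := by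
    funext st i; simp [extStep]
  rw [hstep]
  have hbridge := PySem.List.foldl_pyRange_pyGetD' (a :: rest) 0
    (fun (st : List Int × List Int) (x : Int) =>
      if x ≥ PySem.List.pyGetD st.1 (-1) 0 then (st.1 ++ [x], st.2)
      else (st.1, st.2 ++ [x]))
    ([PySem.List.pyGetD (a :: rest) 0 0], []) (a := 1) (by omega)
  rw [hbridge]
  rw [PySem.List.pyGetD_zero_cons]
  have hdrop : List.drop (Int.toNat 1) (a :: rest) = rest := by simp
  rw [hdrop]
  have := foldl_f_eq_pvExt rest [a] [] (by simp)
  have htop : pvTop [a] = a := by simp [pvTop]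
  rw [htop] at this
  simpa using this

-- ---- B side: vpStep computes pvFF ----

theorem bisect_spec (tops : List Int) (x : Int)
    (hmono : ∀ i j : Nat, i ≤ j → j < tops.length →
      tops.getD i 0 ≤ x → tops.getD j 0 ≤ x) :
    ∀ (d lo hi : Nat), hi - lo ≤ d → lo ≤ hi → hi ≤ tops.length →
      (∀ j, j < lo → ¬ tops.getD j 0 ≤ x) →
      (∀ j, hi ≤ j → j < tops.length → tops.getD j 0 ≤ x) →
      lo ≤ bisectLoop tops x lo hi ∧ bisectLoop tops x lo hi ≤ hi ∧
      (∀ j, j < bisectLoop tops x lo hi → ¬ tops.getD j 0 ≤ x) ∧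
      (bisectLoop tops x lo hi < tops.length →
        tops.getD (bisectLoop tops x lo hi) 0 ≤ x) := by
  intro d
  induction d with
  | zero =>
      intro lo hi hd hlh hhi h2 h3
      rw [bisectLoop, dif_neg (by omega)]
      exact ⟨le_rfl, hlh, h2, fun hlt => h3 lo (by omega) hlt⟩
  | succ d ih =>
      intro lo hi hd hlh hhi h2 h3
      by_cases hc : lo < hi
      · rw [bisectLoop, dif_pos hc]
        by_cases hm : tops.getD ((lo + hi) / 2) 0 ≤ x
        · rw [if_pos hm]
          obtain ⟨a1, a2, a3, a4⟩ := ih lo ((lo + hi) / 2) (by omega) (by omega) (by omega)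
            h2 (fun j hj hjl => hmono ((lo + hi) / 2) j hj hjl hm)
          exact ⟨a1, by omega, a3, a4⟩
        · rw [if_neg hm]
          obtain ⟨a1, a2, a3, a4⟩ := ih ((lo + hi) / 2 + 1) hi (by omega) (by omega) hhi
            (fun j hj hx => hm (hmono j ((lo + hi) / 2) (by omega) (by omega) hx))
            h3
          exact ⟨by omega, a2, a3, a4⟩
      · rw [bisectLoop, dif_neg hc]
        exact ⟨le_rfl, hlh, h2, fun hlt => h3 lo (by omega) hlt⟩

theorem ff_of_firstIdx : ∀ (piles : List (List Int)) (x : Int) (i : Nat),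
    (∀ j, j < i → ¬ pvTop (piles.getD j []) ≤ x) → i ≤ piles.length →
    (i < piles.length → pvTop (piles.getD i []) ≤ x) →
    pvFF piles x = if i = piles.length then piles ++ [[x]]
      else piles.set i (piles.getD i [] ++ [x])
  | [], x, i, _h1, h2, _h3 => by
      have hi : i = 0 := by simpa using h2
      subst hi; simp [pvFF]
  | p :: ps, x, 0, _h1, _h2, h3 => by
      have hp : pvTop p ≤ x := by simpa using h3 (by simp)
      simp [pvFF, hp]
  | p :: ps, x, (k + 1), h1, h2, h3 => by
      have hp : ¬ pvTop p ≤ x := by simpa using h1 0 (by omega)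
      have hrec := ff_of_firstIdx ps x k
        (fun j hj => by simpa using h1 (j + 1) (by omega))
        (by simp only [List.length_cons] at h2; omega)
        (fun hk => by
          have := h3 (by simp only [List.length_cons]; omega)
          simpa using this)
      simp only [pvFF, if_neg hp, hrec]
      by_cases hk : k = ps.length
      · simp [hk]
      · simp [hk]

theorem vpStep_eq_pvFF (piles : List (List Int)) (x : Int)
    (hd : (piles.map pvTop).Pairwise (· > ·)) :
    vpStep (piles, piles.map pvTop) x = (pvFF piles x, (pvFF piles x).map pvTop)
      ∧ ((pvFF piles x).map pvTop).Pairwise (· > ·) := by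
  have hlen : (piles.map pvTop).length = piles.length := by simp
  have hmono : ∀ i j : Nat, i ≤ j → j < (piles.map pvTop).length →
      (piles.map pvTop).getD i 0 ≤ x → (piles.map pvTop).getD j 0 ≤ x := by
    intro i j hij hj hi
    rcases Nat.lt_or_ge i j with hlt | _hge
    · have hp := List.pairwise_iff_getElem.mp hd i j (by omega) hj hlt
      rw [List.getD_eq_getElem _ _ (by omega)] at hi
      rw [List.getD_eq_getElem _ _ hj]
      exact le_of_lt (lt_of_lt_of_le hp hi)
    · have : i = j := by omega
      subst this; exact hi
  obtain ⟨_b1, b2, b3, b4⟩ := bisect_spec (piles.map pvTop) x hmono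
    piles.length 0 piles.length (by omega) (by omega) (by omega)
    (fun j hj => absurd hj (by omega))
    (fun j hj hjl => absurd hjl (by omega))
  have hstep : vpStep (piles, piles.map pvTop) x
      = if bisectLoop (piles.map pvTop) x 0 piles.length = piles.length
        then (piles ++ [[x]], piles.map pvTop ++ [x])
        else (piles.set (bisectLoop (piles.map pvTop) x 0 piles.length)
                (piles.getD (bisectLoop (piles.map pvTop) x 0 piles.length) [] ++ [x]),
              (piles.map pvTop).set (bisectLoop (piles.map pvTop) x 0 piles.length) x) := rfl
  set r := bisectLoop (piles.map pvTop) x 0 piles.length with hrdef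
  have hbr : ∀ j, j < piles.length → (piles.map pvTop).getD j 0 = pvTop (piles.getD j []) := by
    intro j hj
    rw [List.getD_eq_getElem _ _ (by omega), List.getD_eq_getElem _ _ hj, List.getElem_map]
  have hff := ff_of_firstIdx piles x r
    (fun j hj => by rw [← hbr j (by omega)]; exact b3 j hj)
    b2
    (fun hlt => by rw [← hbr r hlt]; exact b4 (by omega))
  have hxr : ∀ (hlt : r < piles.length), (piles.map pvTop)[r]'(by simpa using hlt) ≤ x := by
    intro hlt
    have := b4 (by omega)
    rwa [List.getD_eq_getElem _ _ (by omega)] at this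
  have hltr : ∀ j (hj : j < piles.length), j < r → x < (piles.map pvTop)[j]'(by simpa using hj) := by
    intro j hj hjr
    have := b3 j hjr
    rw [List.getD_eq_getElem _ _ (by omega)] at this
    omega
  constructor
  · rw [hstep, hff]
    by_cases hrl : r = piles.length
    · rw [if_pos hrl, if_pos hrl]
      simp [pvTop]
    · rw [if_neg hrl, if_neg hrl]
      refine Prod.ext rfl ?_
      simp [pvTop_append]
  · rw [hff]
    by_cases hrl : r = piles.length
    · rw [if_pos hrl]
      rw [List.map_append]
      refine List.pairwise_append.mpr ⟨hd, by simp, ?_⟩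
      intro a ha b hb
      have hb' : b = x := by simpa [pvTop] using hb
      subst hb'
      obtain ⟨j, hj, hja⟩ := List.getElem_of_mem ha
      subst hja
      have hj' : j < piles.length := by simpa using hj
      exact hltr j hj' (by rw [hrl]; exact hj')
    · rw [if_neg hrl]
      have hrlt : r < piles.length := lt_of_le_of_ne b2 hrl
      have hms : (piles.set r (piles.getD r [] ++ [x])).map pvTop
          = (piles.map pvTop).set r x := by
        simp [pvTop_append]
      rw [hms]
      refine List.pairwise_iff_getElem.mpr ?_
      intro i j hi hj hij
      simp only [List.length_set] at hi hj
      rw [List.getElem_set, List.getElem_set]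
      have hdd : ∀ (i j : Nat) (hi : i < (piles.map pvTop).length)
          (hj : j < (piles.map pvTop).length), i < j →
          (piles.map pvTop)[j] < (piles.map pvTop)[i] := by
        intro i j hi hj hij
        exact List.pairwise_iff_getElem.mp hd i j hi hj hij
      by_cases h1 : r = i
      · subst h1
        rw [if_pos rfl, if_neg (by omega)]
        have := hdd r j (by omega) (by omega) hij
        have := hxr hrlt
        omega
      · rw [if_neg h1]
        by_cases h2 : r = j
        · subst h2
          rw [if_pos rfl]
          exact hltr i (by omega) (by omega)
        · rw [if_neg h2]
          exact hdd i j (by omega) (by omega) hij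

theorem foldl_vpStep_eq_pvFF (xs : List Int) :
    ∀ piles : List (List Int), (piles.map pvTop).Pairwise (· > ·) →
      xs.foldl vpStep (piles, piles.map pvTop)
        = (xs.foldl pvFF piles, (xs.foldl pvFF piles).map pvTop) := by
  induction xs with
  | nil => intro piles _; simp
  | cons x xs ih =>
      intro piles hd
      obtain ⟨heq, hd'⟩ := vpStep_eq_pvFF piles x hd
      simp only [List.foldl_cons, heq]
      exact ih (pvFF piles x) hd'

theorem alt_eq_foldl_pvFF (seq : List Int) :
    vanilla_partitioning_alt seq = seq.foldl pvFF [] := by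
  unfold vanilla_partitioning_alt
  have := foldl_vpStep_eq_pvFF seq [] (by simp)
  simp only [List.map_nil] at this
  rw [this]

-- ---- the run extraction law for pvFF ----

theorem foldl_pvFF_cons (xs : List Int) :
    ∀ (p : List Int) (ps : List (List Int)),
      xs.foldl pvFF (p :: ps)
        = (p ++ (pvExt (pvTop p) xs).1) :: (pvExt (pvTop p) xs).2.foldl pvFF ps := by
  induction xs with
  | nil => intro p ps; simp [pvExt]
  | cons x xs ih =>
      intro p ps
      simp only [List.foldl_cons, pvFF, pvExt]
      by_cases hc : pvTop p ≤ x
      · simp only [if_pos hc]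
        rw [ih (p ++ [x]) ps, pvTop_append]
        simp
      · simp only [if_neg hc]
        rw [ih p (pvFF ps x)]
        simp [List.foldl_cons]

-- ---- A equals the pvFF fold ----

theorem A_eq_foldl_pvFF : ∀ (n : Nat) (seq : List Int), seq.length ≤ n → seq ≠ [] →
    vanilla_partitioning seq = seq.foldl pvFF [] := by
  intro n
  induction n with
  | zero => intro seq hlen hne; cases seq <;> simp_all
  | succ n ih =>
      intro seq hlen hne
      rcases seq with _ | ⟨a, rest⟩
      · exact absurd rfl hne
      · rw [vanilla_partitioning]
        simp only [extract_eq_pvExt]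
        have hfold : (a :: rest).foldl pvFF []
            = (a :: (pvExt a rest).1) :: (pvExt a rest).2.foldl pvFF [] := by
          have := foldl_pvFF_cons rest [a] []
          have htop : pvTop [a] = a := by simp [pvTop]
          rw [htop] at this
          simpa [List.foldl_cons, pvFF] using this
        by_cases h2 : (pvExt a rest).2 = []
        · simp [hfold, h2]
        · have hlt : (pvExt a rest).2.length < (a :: rest).length := by
            have := extract_snd_lt (a :: rest)
            rw [extract_eq_pvExt] at this
            exact this h2
          have hvp : vanilla_partitioning (pvExt a rest).2
              = (pvExt a rest).2.foldl pvFF [] :=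
            ih _ (by simp only [List.length_cons] at hlen hlt ⊢; omega) h2
          rw [hfold, ← hvp]
          simp [h2]

-- ===== VERDICT (by name: the statement is the Claim_ definition above) =====
theorem vanilla_partitioning_spec : Claim_equal_vanilla_partitioning := by
  intro seq _ hpre
  unfold Spec_vanilla_partitioning
  rw [alt_eq_foldl_pvFF, A_eq_foldl_pvFF seq.length seq le_rfl hpre]
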